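-- pv_equiv track=rewrite | github.com/HaegyeongKim01/algorithm-solution | programmers/Umm문자열1/solution.py | isUmm
-- ===== SOURCE A (Python) =====
-- def isUmm(s):
--     if len(s) < 3:
--         return False
--
--     if not(s[0] == 'U' and s[1] =='m' and s[2] =='m'):
--         return False
--
--     for i in range(3, len(s)):
--         if s[i] != 'm':
--             return False
--
--     return True
-- ===== SOURCE B (Python) =====
-- def isUmm(s):
--     return len(s) >= 3 and s == 'U' + 'm' * (len(s) - 1)
-- ===== Notes on version B (the rewrite author's own statement) =====
-- stated objective: simpler
-- what changed: Instead of indexing the first three characters and scanning the rest with early exits, B keeps the length guard and builds the whole expected string once, returning a single equality comparison.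
import Mathlib
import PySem

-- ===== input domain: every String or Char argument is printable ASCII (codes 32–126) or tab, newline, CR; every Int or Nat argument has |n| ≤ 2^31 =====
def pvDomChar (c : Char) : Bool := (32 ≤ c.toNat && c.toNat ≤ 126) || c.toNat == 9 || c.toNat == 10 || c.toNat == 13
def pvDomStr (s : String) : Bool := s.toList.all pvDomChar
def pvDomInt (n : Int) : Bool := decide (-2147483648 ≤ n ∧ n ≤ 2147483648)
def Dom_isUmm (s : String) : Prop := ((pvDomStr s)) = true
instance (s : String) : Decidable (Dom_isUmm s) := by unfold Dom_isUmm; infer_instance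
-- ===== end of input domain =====

-- B replaces A's indexing and per-character scan with building the canonical
-- string 'U' + 'm'*(n-1) and one equality comparison (objective: simpler).

-- ===== PORT A =====
-- the 'for i in range(3, len(s)): if s[i] != 'm': return False' loop over the remaining characters
def isUmmLoop : List Char → Bool
  | [] => true
  | c :: rest => if c ≠ 'm' then false else isUmmLoop rest

def isUmm (s : String) : Bool :=
  let cs := s.toList
  if PySem.Chars.len cs < 3 then false
  else if !((PySem.List.pyGet? cs 0 == some 'U') && (PySem.List.pyGet? cs 1 == some 'm')
            && (PySem.List.pyGet? cs 2 == some 'm')) then false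
  else isUmmLoop (cs.drop 3)

-- ===== PORT B =====
def isUmm_alt (s : String) : Bool :=
  decide (3 ≤ PySem.Chars.len s.toList)
    && (s.toList == 'U' :: List.replicate (s.toList.length - 1) 'm')

-- ===== PRECONDITION & SPEC =====
def Spec_isUmm (s : String) (out : Bool) : Prop := out = isUmm_alt s
instance (s : String) (out : Bool) : Decidable (Spec_isUmm s out) := by unfold Spec_isUmm; infer_instance

-- ===== CLAIM (what is proved, stated in full; the proofs are below) =====
def Claim_equal_isUmm : Prop := ∀ (s : String), Dom_isUmm s → Spec_isUmm s (isUmm s)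

-- ===== LEMMAS AND PROOFS =====
theorem isUmmLoop_eq (l : List Char) : isUmmLoop l = (l == List.replicate l.length 'm') := by
  induction l with
  | nil => rfl
  | cons c rest ih =>
    by_cases h : c = 'm' <;> simp [isUmmLoop, h, ih, List.replicate_succ]

-- ===== VERDICT (by name: the statement is the Claim_ definition above) =====
theorem isUmm_spec : Claim_equal_isUmm := by
  intro s _
  unfold Spec_isUmm isUmm isUmm_alt
  match hcs : s.toList with
  | [] => decide
  | [a] => simp [PySem.Chars.len]
  | [a, b] => simp [PySem.Chars.len]
  | a :: b :: c :: rest =>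
    simp only [PySem.Chars.len, List.length_cons, isUmmLoop_eq]
    have h0 : (0:Int) ≤ (rest.length:Int) + 1 + 1 := by omega
    have h1 : (0:Int) ≤ (rest.length:Int) + 1 := by omega
    have h2 : (2:Int) ≤ (rest.length:Int) + 1 + 1 := by omega
    have h3 : ¬((rest.length:Int) + 1 + 1 + 1 < 3) := by omega
    have h4 : (3:Int) ≤ (rest.length:Int) + 1 + 1 + 1 := by omega
    by_cases ha : a = 'U' <;> by_cases hb : b = 'm' <;> by_cases hc : c = 'm' <;>
      simp [*, List.replicate_succ, PySem.List.pyGet?, PySem.List.pyIdx?]
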